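-- pv_equiv track=rewrite | github.com/hydraplatform/hydra-server | tests/test_units.py | arr_to_vector
-- ===== SOURCE A (Python) =====
-- def arr_to_vector(arr):
--     """Reshape a multidimensional array to a vector.
--     """
--     dim = array_dim(arr)
--     tmp_arr = []
--     for n in range(len(dim) - 1):
--         for inner in arr:
--             for i in inner:
--                 tmp_arr.append(i)
--         arr = tmp_arr
--         tmp_arr = []
--     return arr
--
-- def array_dim(arr):
--     """Return the size of a multidimansional array.
--     """
--     dim = []
--     while True:
--         try:
--             dim.append(len(arr))
--             arr = arr[0]
--         except TypeError:
--             return dim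
-- ===== SOURCE B (Python) =====
-- def arr_to_vector(arr):
--     """Reshape a multidimensional array to a vector."""
--     return [x for inner in arr for x in inner]
-- ===== Notes on version B (the rewrite author's own statement) =====
-- stated objective: simpler
-- what changed: B drops the array_dim probing helper and the level-by-level rebuild loop and flattens the 2-D list in one comprehension pass.
import Mathlib
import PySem

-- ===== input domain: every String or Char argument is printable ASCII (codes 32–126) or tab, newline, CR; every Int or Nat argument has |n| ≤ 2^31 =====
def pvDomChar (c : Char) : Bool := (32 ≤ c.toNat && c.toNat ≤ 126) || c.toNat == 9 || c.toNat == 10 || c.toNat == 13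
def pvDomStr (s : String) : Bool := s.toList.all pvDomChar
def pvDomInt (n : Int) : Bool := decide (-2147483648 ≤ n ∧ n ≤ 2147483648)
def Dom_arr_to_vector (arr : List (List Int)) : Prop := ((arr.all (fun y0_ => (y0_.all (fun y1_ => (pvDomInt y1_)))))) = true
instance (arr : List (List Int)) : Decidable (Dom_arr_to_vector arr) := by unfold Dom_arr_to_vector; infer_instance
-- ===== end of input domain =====

-- B replaces A's array_dim probe and level-by-level rebuild loop with one flattening
-- comprehension (objective: simpler). Equal wherever A returns.

-- ===== PORT A =====
-- array_dim(arr): dim = [len(arr)]; arr = arr[0] (IndexError if arr == [] → none);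
-- dim.append(len(arr[0])); arr = arr[0][0] (IndexError if arr[0] == [] → none);
-- len(int) raises TypeError → return dim. On List (List Int) this is exact: the probe
-- stops after two levels, so dim (when A does not raise) is [len arr, len arr[0]].
def array_dim_A (arr : List (List Int)) : Option (List Int) :=
  match PySem.List.pyGet? arr 0 with
  | none => none                      -- IndexError: A raises (excluded by Pre_)
  | some inner =>
    match PySem.List.pyGet? inner 0 with
    | none => none                    -- IndexError: A raises (excluded by Pre_)
    | some _ => some [(arr.length : Int), (inner.length : Int)]

-- for n in range(len(dim)-1): nested append loop, then arr = tmp_arr. Here len(dim) = 2,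
-- so range(len(dim)-1) runs the body exactly once; that one pass is the nested foldl.
def arr_to_vector (arr : List (List Int)) : List Int :=
  match array_dim_A arr with
  | none => []                        -- unreachable under Pre_ (Python raised)
  | some _ =>
    arr.foldl (fun tmp_arr inner => inner.foldl (fun t i => t ++ [i]) tmp_arr) []

-- ===== PORT B =====
-- [x for inner in arr for x in inner]
def arr_to_vector_alt (arr : List (List Int)) : List Int :=
  arr.flatMap (fun inner => inner)

-- ===== PRECONDITION & SPEC =====
-- Pre_ excludes exactly the inputs on which A raises IndexError inside array_dim:
-- the empty list and lists whose first inner list is empty.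
def Pre_arr_to_vector (arr : List (List Int)) : Prop := arr ≠ [] ∧ arr.headI ≠ []
instance (arr : List (List Int)) : Decidable (Pre_arr_to_vector arr) := by
  unfold Pre_arr_to_vector; infer_instance

def pvWitness_arr_to_vector : List (List Int) := [[1, 2], [3]]

def Spec_arr_to_vector (arr : List (List Int)) (out : List Int) : Prop := out = arr_to_vector_alt arr
instance (arr : List (List Int)) (out : List Int) : Decidable (Spec_arr_to_vector arr out) := by unfold Spec_arr_to_vector; infer_instance

-- ===== CLAIM (what is proved, stated in full; the proofs are below) =====
def Claim_equal_arr_to_vector : Prop := ∀ (arr : List (List Int)), Dom_arr_to_vector arr → Pre_arr_to_vector arr → Spec_arr_to_vector arr (arr_to_vector arr)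

-- ===== LEMMAS AND PROOFS =====
theorem foldl_append_one (inner : List Int) (acc : List Int) :
    inner.foldl (fun t i => t ++ [i]) acc = acc ++ inner := by
  induction inner generalizing acc with
  | nil => simp
  | cons x xs ih => rw [List.foldl_cons, ih]; simp

theorem foldl_flatten (arr : List (List Int)) (acc : List Int) :
    arr.foldl (fun tmp_arr inner => inner.foldl (fun t i => t ++ [i]) tmp_arr) acc
      = acc ++ arr.flatMap (fun inner => inner) := by
  induction arr generalizing acc with
  | nil => simp
  | cons inner rest ih =>
    rw [List.foldl_cons, foldl_append_one, ih]
    simp [List.flatMap]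

-- ===== VERDICT (by name: the statement is the Claim_ definition above) =====
theorem arr_to_vector_spec : Claim_equal_arr_to_vector := by
  intro arr _ hpre
  obtain ⟨hne, hhead⟩ := hpre
  match arr with
  | [] => exact absurd rfl hne
  | inner :: rest =>
    match inner with
    | [] => exact absurd rfl hhead
    | x :: xs =>
      show arr_to_vector _ = arr_to_vector_alt _
      simp only [arr_to_vector, array_dim_A, PySem.List.pyGet?, PySem.List.pyIdx?]
      rw [foldl_flatten]
      simp [arr_to_vector_alt]
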